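-- pv_equiv track=rewrite | github.com/signalsky/VideoAgent | backend/ai.py | process_srt_list
-- ===== SOURCE A (Python) =====
-- def process_srt_list(srt_list):
--     result = []
--     current_start = None
--     current_end = None
--     current_text = ""
--     current_duration = 0
--
--     for start, end, text in srt_list:
--         if current_start is None:
--             current_start = start
--
--         current_text += text
--         current_end = end
--         current_duration += end - start
--
--         if current_duration >= 45:
--             result.append((current_start, current_end, current_text))
--             current_start = None
--             current_text = ""
--             current_duration = 0
--
--     # 处理最后一组未达到 1 分钟的字幕
--     if current_start is not None:
--         result.append((current_start, current_end, current_text))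
--
--     return result
-- ===== SOURCE B (Python) =====
-- def take_group(rows):
--     """Split off the shortest prefix whose accumulated duration reaches 45
--     (or all rows if it never does)."""
--     total = 0
--     for i, (s, e, _t) in enumerate(rows):
--         total += e - s
--         if total >= 45:
--             return rows[:i + 1], rows[i + 1:]
--     return rows, []
--
--
-- def process_srt_list(srt_list):
--     out = []
--     rest = srt_list
--     while rest:
--         group, rest = take_group(rest)
--         out.append((group[0][0], group[-1][1], "".join(r[2] for r in group)))
--     return out
-- ===== Notes on version B (the rewrite author's own statement) =====
-- stated objective: alternative
-- what changed: A folds once over the rows with five running accumulators (start/end/text/duration/result); B is a split-then-summarize decomposition: take_group slices off each chunk whose accumulated duration reaches 45, and a summarize step builds (group[0][0], group[-1][1], joined text) per chunk.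
import Mathlib
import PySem

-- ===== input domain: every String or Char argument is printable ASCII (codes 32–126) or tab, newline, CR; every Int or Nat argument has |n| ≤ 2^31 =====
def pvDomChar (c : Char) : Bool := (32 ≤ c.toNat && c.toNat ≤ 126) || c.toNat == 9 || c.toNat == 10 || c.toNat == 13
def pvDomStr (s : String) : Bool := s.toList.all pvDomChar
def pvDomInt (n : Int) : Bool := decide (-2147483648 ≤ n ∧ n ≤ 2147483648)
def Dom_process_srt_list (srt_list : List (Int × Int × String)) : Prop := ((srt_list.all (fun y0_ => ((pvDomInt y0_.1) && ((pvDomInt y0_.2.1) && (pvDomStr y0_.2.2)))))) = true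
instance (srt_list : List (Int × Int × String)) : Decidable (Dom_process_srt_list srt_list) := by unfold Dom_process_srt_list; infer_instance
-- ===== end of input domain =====

-- B re-does the task as split-into-chunks-then-summarize (take_group + summarize per chunk)
-- instead of A's single fold over five running accumulators; objective: alternative decomposition, same cost.

-- ===== PORT A =====
-- literal port of A's loop state: result, current_start (None-able), current_end (None-able),
-- current_text, current_duration
def pvLoopA : List (Int × Int × String) → List (Int × Int × String) →
    Option Int → Option Int → String → Int → List (Int × Int × String)
  | [], result, cs, ce, ct, _cd =>
    match cs with
    -- `.getD 0` is an unreachable default: whenever current_start is set, current_end has been set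
    | some s0 => result ++ [(s0, ce.getD 0, ct)]
    | none => result
  | (s, e, t) :: rest, result, cs, _ce, ct, cd =>
    let cs' := match cs with | none => some s | some x => some x
    let ct' := ct ++ t
    let ce' : Option Int := some e
    let cd' := cd + (e - s)
    if cd' ≥ 45 then
      -- `.getD 0` unreachable: cs' is always `some` here
      pvLoopA rest (result ++ [(cs'.getD 0, e, ct')]) none ce' "" 0
    else
      pvLoopA rest result cs' ce' ct' cd'

def process_srt_list (srt_list : List (Int × Int × String)) : List (Int × Int × String) :=
  pvLoopA srt_list [] none none "" 0

-- ===== PORT B =====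
-- take_group: split off the shortest prefix whose accumulated duration reaches 45
-- (or all rows if it never does); the running `total` is the loop variable
def pvTakeGroup : Int → List (Int × Int × String) →
    List (Int × Int × String) × List (Int × Int × String)
  | _, [] => ([], [])
  | total, (s, e, t) :: rest =>
    let total' := total + (e - s)
    if total' ≥ 45 then ([(s, e, t)], rest)
    else
      let p := pvTakeGroup total' rest
      ((s, e, t) :: p.1, p.2)

-- (group[0][0], group[-1][1], "".join(r[2] for r in group)); the defaults are
-- unreachable since take_group's group is nonempty whenever it is summarized
def pvSummarize (g : List (Int × Int × String)) : Int × Int × String :=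
  ((g.headD (0, 0, "")).1, (g.getLastD (0, 0, "")).2.1,
   PySem.Str.join "" (g.map (fun r => r.2.2)))

theorem pvTakeGroup_snd_length : ∀ (rest : List (Int × Int × String)) (total s e : Int)
    (txt : String), (pvTakeGroup total ((s, e, txt) :: rest)).2.length ≤ rest.length := by
  intro rest
  induction rest with
  | nil => intro total s e txt; simp only [pvTakeGroup]; split <;> simp
  | cons y ys ih =>
    intro total s e txt
    simp only [pvTakeGroup]
    split
    · simp
    · obtain ⟨ys1, ye, yt⟩ := y
      exact le_trans (ih _ _ _ _) (by simp)

def pvLoopB : List (Int × Int × String) → List (Int × Int × String)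
  | [] => []
  | (s, e, t) :: rest =>
    let p := pvTakeGroup 0 ((s, e, t) :: rest)
    pvSummarize p.1 :: pvLoopB p.2
termination_by l => l.length
decreasing_by
  simpa using Nat.lt_succ_of_le (pvTakeGroup_snd_length rest 0 s e t)

def process_srt_list_alt (srt_list : List (Int × Int × String)) : List (Int × Int × String) :=
  pvLoopB srt_list

-- ===== PRECONDITION & SPEC =====
def Spec_process_srt_list (srt_list : List (Int × Int × String)) (out : List (Int × Int × String)) : Prop := out = process_srt_list_alt srt_list
instance (srt_list : List (Int × Int × String)) (out : List (Int × Int × String)) : Decidable (Spec_process_srt_list srt_list out) := by unfold Spec_process_srt_list; infer_instance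

-- ===== CLAIM (what is proved, stated in full; the proofs are below) =====
def Claim_equal_process_srt_list : Prop := ∀ (srt_list : List (Int × Int × String)), Dom_process_srt_list srt_list → Spec_process_srt_list srt_list (process_srt_list srt_list)

-- ===== LEMMAS AND PROOFS =====

theorem pv_join_empty_nil : PySem.Str.join "" [] = "" := by
  apply String.toList_inj.mp
  simp [PySem.Str.toList_join, PySem.Chars.join_nil]

theorem pv_join_empty_cons (t : String) (ts : List String) :
    PySem.Str.join "" (t :: ts) = t ++ PySem.Str.join "" ts := by
  apply String.toList_inj.mp
  cases ts <;>
    simp [PySem.Str.toList_join, PySem.Chars.join_nil, PySem.Chars.join_singleton,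
      PySem.Chars.join_cons_cons]

theorem pv_join_empty_singleton (t : String) : PySem.Str.join "" [t] = t := by
  rw [pv_join_empty_cons, pv_join_empty_nil]; simp

theorem pv_getLastD_cons (x : Int × Int × String) (g : List (Int × Int × String))
    (d : Int × Int × String) : (x :: g).getLastD d = g.getLastD x := by
  cases g <;> simp [List.getLastD]

theorem pv_getLast?_getD_cons (x : Int × Int × String) (g : List (Int × Int × String))
    (d : Int × Int × String) : ((x :: g).getLast?).getD d = (g.getLast?).getD x := by
  cases g <;> simp [List.getLast?_cons]

theorem pvTakeGroup_cons_ge (total s e : Int) (t : String)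
    (rest : List (Int × Int × String)) (h : total + (e - s) ≥ 45) :
    pvTakeGroup total ((s, e, t) :: rest) = ([(s, e, t)], rest) := by
  simp only [pvTakeGroup, if_pos h]

theorem pvTakeGroup_cons_lt (total s e : Int) (t : String)
    (rest : List (Int × Int × String)) (h : ¬ total + (e - s) ≥ 45) :
    pvTakeGroup total ((s, e, t) :: rest) =
      ((s, e, t) :: (pvTakeGroup (total + (e - s)) rest).1,
       (pvTakeGroup (total + (e - s)) rest).2) := by
  simp only [pvTakeGroup, if_neg h]

theorem pvTakeGroup_fst_cons (total s e : Int) (t : String)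
    (rest : List (Int × Int × String)) :
    ∃ g', (pvTakeGroup total ((s, e, t) :: rest)).1 = (s, e, t) :: g' := by
  by_cases h : total + (e - s) ≥ 45
  · exact ⟨[], by rw [pvTakeGroup_cons_ge _ _ _ _ _ h]⟩
  · exact ⟨_, by rw [pvTakeGroup_cons_lt _ _ _ _ _ h]⟩

-- P: A's loop from a fresh group state equals B's chunk recursion (prepending prior results);
-- Q: A's loop mid-group equals "finish the current group via take_group, then recurse".
theorem pv_main : ∀ (n : Nat) (l : List (Int × Int × String)), l.length ≤ n →
    (∀ (res : List (Int × Int × String)) (ce : Option Int),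
        pvLoopA l res none ce "" 0 = res ++ pvLoopB l) ∧
    (∀ (res : List (Int × Int × String)) (s0 ce : Int) (ct : String) (cd : Int),
        pvLoopA l res (some s0) (some ce) ct cd =
          match l with
          | [] => res ++ [(s0, ce, ct)]
          | _ :: _ =>
            res ++ [(s0, ((pvTakeGroup cd l).1.getLastD (0, 0, "")).2.1,
                     ct ++ PySem.Str.join "" ((pvTakeGroup cd l).1.map (fun r => r.2.2)))]
              ++ pvLoopB (pvTakeGroup cd l).2) := by
  intro n
  induction n with
  | zero =>
    intro l hl
    have : l = [] := List.eq_nil_of_length_eq_zero (Nat.le_zero.mp hl)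
    subst this
    exact ⟨fun res ce => by simp [pvLoopA, pvLoopB], fun res s0 ce ct cd => by simp [pvLoopA]⟩
  | succ n ih =>
    intro l hl
    match l with
    | [] =>
      exact ⟨fun res ce => by simp [pvLoopA, pvLoopB], fun res s0 ce ct cd => by simp [pvLoopA]⟩
    | (s, e, t) :: rest =>
      have hr := ih rest (by simpa using Nat.le_of_succ_le_succ hl)
      constructor
      · intro res ce
        simp only [pvLoopA]
        by_cases h45 : 0 + (e - s) ≥ 45
        · rw [if_pos h45, (hr.1 _ _)]
          simp only [pvLoopB, pvTakeGroup_cons_ge 0 s e t rest h45, pvSummarize]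
          simp [pv_join_empty_singleton]
        · rw [if_neg h45, (hr.2 _ _ _ _ _)]
          match rest with
          | [] =>
            simp only [pvLoopB, pvTakeGroup, pvSummarize]
            simp [pvLoopB, pv_join_empty_singleton]
          | (s1, e1, t1) :: rs =>
            simp only [pvLoopB, pvTakeGroup_cons_lt 0 s e t ((s1, e1, t1) :: rs) h45,
              pvSummarize]
            obtain ⟨g', hg'⟩ := pvTakeGroup_fst_cons (0 + (e - s)) s1 e1 t1 rs
            rw [hg', pv_getLastD_cons, pv_getLastD_cons, List.map_cons, pv_join_empty_cons]
            simp [pv_join_empty_cons, pv_getLast?_getD_cons]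
      · intro res s0 ce ct cd
        simp only [pvLoopA]
        by_cases h45 : cd + (e - s) ≥ 45
        · rw [if_pos h45, (hr.1 _ _)]
          simp only [pvTakeGroup_cons_ge cd s e t rest h45]
          simp [pv_join_empty_singleton]
        · rw [if_neg h45, (hr.2 _ _ _ _ _)]
          match rest with
          | [] =>
            simp [pvLoopB, pvTakeGroup, pv_join_empty_singleton]
          | (s1, e1, t1) :: rs =>
            simp only [pvTakeGroup_cons_lt cd s e t ((s1, e1, t1) :: rs) h45]
            obtain ⟨g', hg'⟩ := pvTakeGroup_fst_cons (cd + (e - s)) s1 e1 t1 rs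
            rw [hg', pv_getLastD_cons, pv_getLastD_cons, List.map_cons, pv_join_empty_cons]
            simp [String.append_assoc, pv_getLast?_getD_cons, pv_join_empty_cons]

-- ===== VERDICT (by name: the statement is the Claim_ definition above) =====
theorem process_srt_list_spec : Claim_equal_process_srt_list := by
  intro l _
  unfold Spec_process_srt_list process_srt_list process_srt_list_alt
  simpa using (pv_main l.length l le_rfl).1 [] none
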